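-- pv_equiv track=rewrite | github.com/rsprenkels/kattis | python/2_2/perket.py | perket
-- ===== SOURCE A (Python) =====
-- from functools import reduce
-- from itertools import combinations
-- from typing import Sequence, Tuple
--
-- def perket(ingredients: Sequence[Tuple[int, int]]) -> int:
--     best = 1000000000000000000
--     for num_ingredients in range(1, len(ingredients) + 1):
--         for c in combinations(ingredients, num_ingredients):
--             sour = reduce(lambda a,b : a*b, [x[0] for x in c])
--             bitter = reduce(lambda a,b : a+b, [x[1] for x in c])
--             best = min(best, abs(sour - bitter))
--     return best
-- ===== SOURCE B (Python) =====
-- def perket(ingredients):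
--     # Incremental subset DP: keep (product-of-sour, sum-of-bitter) for every
--     # non-empty subset seen so far; each new ingredient doubles the pool (+ itself).
--     subs = []
--     for s, b in ingredients:
--         subs = [(p * s, q + b) for (p, q) in subs] + [(s, b)] + subs
--     best = 1000000000000000000
--     for p, q in subs:
--         best = min(best, abs(p - q))
--     return best
-- ===== Notes on version B (the rewrite author's own statement) =====
-- stated objective: alternative
-- what changed: Replaces the size-by-size itertools.combinations enumeration with full reduce-recomputation per subset by a one-pass subset DP that extends running (product, sum) pairs incrementally, so each subset costs O(1) instead of O(n); intended as faster (measured 5.9-8.5x on sizes where both finished, but both time out at the largest probe size, so a timing run did not confirm it).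
import Mathlib
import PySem

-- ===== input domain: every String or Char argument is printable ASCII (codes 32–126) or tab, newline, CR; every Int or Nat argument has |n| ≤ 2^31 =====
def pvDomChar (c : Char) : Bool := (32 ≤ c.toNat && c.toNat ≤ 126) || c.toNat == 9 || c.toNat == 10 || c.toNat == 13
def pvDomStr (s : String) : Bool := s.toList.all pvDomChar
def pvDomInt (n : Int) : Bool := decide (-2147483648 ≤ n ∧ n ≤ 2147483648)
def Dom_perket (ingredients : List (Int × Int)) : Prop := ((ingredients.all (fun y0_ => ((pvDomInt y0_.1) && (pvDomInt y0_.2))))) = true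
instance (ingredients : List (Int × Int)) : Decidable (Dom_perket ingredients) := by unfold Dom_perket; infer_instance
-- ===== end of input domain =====

-- B replaces A's size-by-size combinations enumeration (recomputing each subset's
-- product and sum from scratch with reduce) by a one-pass subset DP that extends
-- running (product, sum) pairs incrementally (a different algorithm, same exact value).

-- ===== PORT A =====
-- itertools.combinations(l, k) in its enumeration order
def pvComb (k : Nat) (l : List (Int × Int)) : List (List (Int × Int)) :=
  match k, l with
  | 0, _ => [[]]
  | _ + 1, [] => []
  | k + 1, x :: xs => (pvComb k xs).map (fun c => x :: c) ++ pvComb (k + 1) xs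

-- functools.reduce with no initial value; the [] case is unreachable in perket
-- (Python's reduce raises there, but combinations with k ≥ 1 are non-empty)
def pvReduce1 (f : Int → Int → Int) : List Int → Int
  | [] => 0
  | x :: xs => xs.foldl f x

def perket (ingredients : List (Int × Int)) : Int :=
  (PySem.List.pyRange 1 ((ingredients.length : Int) + 1) 1).foldl
    (fun best k =>
      (pvComb k.toNat ingredients).foldl
        (fun best c =>
          min best |pvReduce1 (· * ·) (c.map Prod.fst) - pvReduce1 (· + ·) (c.map Prod.snd)|)
        best)
    1000000000000000000

-- ===== PORT B =====
def perket_alt (ingredients : List (Int × Int)) : Int :=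
  let subs := ingredients.foldl
    (fun vs x => vs.map (fun pq => (pq.1 * x.1, pq.2 + x.2)) ++ [(x.1, x.2)] ++ vs) []
  subs.foldl (fun best pq => min best |pq.1 - pq.2|) 1000000000000000000

-- ===== PRECONDITION & SPEC =====
def Spec_perket (ingredients : List (Int × Int)) (out : Int) : Prop := out = perket_alt ingredients
instance (ingredients : List (Int × Int)) (out : Int) : Decidable (Spec_perket ingredients out) := by unfold Spec_perket; infer_instance

-- ===== CLAIM (what is proved, stated in full; the proofs are below) =====
def Claim_equal_perket : Prop := ∀ (ingredients : List (Int × Int)), Dom_perket ingredients → Spec_perket ingredients (perket ingredients)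

-- ===== LEMMAS AND PROOFS =====

-- (p·sour, q+bitter): extend a subset's (product, sum) pair by one ingredient
def pvCx (x pq : Int × Int) : Int × Int := (pq.1 * x.1, pq.2 + x.2)

def pvStep (m : Multiset (Int × Int)) (x : Int × Int) : Multiset (Int × Int) :=
  m.map (pvCx x) + m

-- (product, sum) pairs of all subsets drawn from l, each extending a pair of m
def pvH (m : Multiset (Int × Int)) (l : List (Int × Int)) : Multiset (Int × Int) :=
  l.foldl pvStep m

-- the (product, sum) pair of one subset, as A computes it (with 1/0 seeds)
def pvPv (c : List (Int × Int)) : Int × Int :=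
  ((c.map Prod.fst).foldl (· * ·) 1, (c.map Prod.snd).foldl (· + ·) 0)

-- A's enumeration: all non-empty combinations, size by size
def pvNa (l : List (Int × Int)) : List (List (Int × Int)) :=
  ((List.range l.length).map (· + 1)).flatMap (fun k => pvComb k l)

-- B's loop body
def pvStepL (vs : List (Int × Int)) (x : Int × Int) : List (Int × Int) :=
  vs.map (fun pq => (pq.1 * x.1, pq.2 + x.2)) ++ [(x.1, x.2)] ++ vs

theorem pvCx_comm (x y p : Int × Int) : pvCx x (pvCx y p) = pvCx y (pvCx x p) := by
  simp only [pvCx, Prod.mk.injEq]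
  exact ⟨by ring, by ring⟩

theorem pvStep_split (m : Multiset (Int × Int)) (x y : Int × Int) :
    pvStep (m.map (pvCx x) + m) y = (pvStep m y).map (pvCx x) + pvStep m y := by
  simp only [pvStep, Multiset.map_add, Multiset.map_map]
  have h : pvCx y ∘ pvCx x = pvCx x ∘ pvCx y := by
    funext p; exact pvCx_comm y x p
  rw [h]; abel

theorem pvH_split (l : List (Int × Int)) (m : Multiset (Int × Int)) (x : Int × Int) :
    pvH (m.map (pvCx x) + m) l = (pvH m l).map (pvCx x) + pvH m l := by
  induction l generalizing m with
  | nil => rfl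
  | cons y ys ih =>
    show pvH (pvStep (m.map (pvCx x) + m) y) ys = _
    rw [pvStep_split, ih (pvStep m y)]; rfl

theorem pvH_cons (m : Multiset (Int × Int)) (x : Int × Int) (l : List (Int × Int)) :
    pvH m (x :: l) = (pvH m l).map (pvCx x) + pvH m l := by
  show pvH (pvStep m x) l = _
  rw [show pvStep m x = m.map (pvCx x) + m from rfl, pvH_split]

theorem foldl_mul_shift (l : List Int) (a b : Int) :
    l.foldl (· * ·) (a * b) = l.foldl (· * ·) a * b := by
  induction l generalizing a with
  | nil => rfl
  | cons y ys ih => simp only [List.foldl_cons]; rw [show a * b * y = a * y * b by ring, ih]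

theorem foldl_add_shift (l : List Int) (a b : Int) :
    l.foldl (· + ·) (a + b) = l.foldl (· + ·) a + b := by
  induction l generalizing a with
  | nil => rfl
  | cons y ys ih => simp only [List.foldl_cons]; rw [show a + b + y = a + y + b by ring, ih]

theorem pvPv_cons (x : Int × Int) (c : List (Int × Int)) :
    pvPv (x :: c) = pvCx x (pvPv c) := by
  simp only [pvPv, pvCx, List.map_cons, List.foldl_cons, Prod.mk.injEq]
  exact ⟨foldl_mul_shift _ 1 x.1, foldl_add_shift _ 0 x.2⟩

theorem pvComb_eq_nil (l : List (Int × Int)) (k : Nat) (h : l.length < k) :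
    pvComb k l = [] := by
  induction l generalizing k with
  | nil => cases k with | zero => omega | succ k => rfl
  | cons x xs ih =>
    cases k with
    | zero => omega
    | succ k =>
      have h' : xs.length < k := by simp only [List.length_cons] at h; omega
      simp only [pvComb]
      rw [ih k h', ih (k + 1) (by omega)]; rfl

theorem mem_pvComb_ne_nil (l : List (Int × Int)) (k : Nat) (c : List (Int × Int))
    (h : c ∈ pvComb (k + 1) l) : c ≠ [] := by
  induction l generalizing k c with
  | nil => simp [pvComb] at h
  | cons x xs ih =>
    simp only [pvComb, List.mem_append, List.mem_map] at h
    rcases h with ⟨d, _, rfl⟩ | h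
    · simp
    · exact ih k c h

theorem coe_flatMap {α β : Type} (L : List α) (g : α → List β) :
    ((L.flatMap g : List β) : Multiset β) = (L.map (fun a => ((g a : List β) : Multiset β))).sum := by
  induction L with
  | nil => rfl
  | cons a L ih =>
    show ((g a ++ L.flatMap g : List β) : Multiset β) = _
    rw [← Multiset.coe_add, ih]
    simp

theorem sum_map_add {α M : Type} [AddCommMonoid M] (L : List α) (f g : α → M) :
    (L.map (fun a => f a + g a)).sum = (L.map f).sum + (L.map g).sum := by
  induction L with
  | nil => simp
  | cons a L ih => simp [ih]; abel

theorem msum_map {α β γ : Type} (L : List α) (A : α → Multiset β) (f : β → γ) :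
    Multiset.map f (L.map A).sum = (L.map (fun a => (A a).map f)).sum := by
  induction L with
  | nil => rfl
  | cons a L ih => simp [Multiset.map_add, ih]

-- the multiset of combinations of sizes 1..n
def pvCsum (xs : List (Int × Int)) (n : Nat) : Multiset (List (Int × Int)) :=
  ((List.range n).map (fun k => ((pvComb (k + 1) xs : List (List (Int × Int))) : Multiset (List (Int × Int))))).sum

theorem coe_pvNa (l : List (Int × Int)) :
    ((pvNa l : List (List (Int × Int))) : Multiset (List (Int × Int))) = pvCsum l l.length := by
  rw [pvNa, List.flatMap_map, coe_flatMap, pvCsum]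

theorem pvCsum_succ (xs : List (Int × Int)) (n : Nat) :
    pvCsum xs (n + 1) = pvCsum xs n + ((pvComb (n + 1) xs : List _) : Multiset _) := by
  rw [pvCsum, List.range_succ]
  simp [pvCsum]

theorem pvNa_cons (x : Int × Int) (xs : List (Int × Int)) :
    ((pvNa (x :: xs) : List (List (Int × Int))) : Multiset (List (Int × Int))) =
      Multiset.map (fun c => x :: c) (([] : List (Int × Int)) ::ₘ (pvNa xs : Multiset (List (Int × Int)))) +
        (pvNa xs : Multiset (List (Int × Int))) := by
  rw [coe_pvNa, coe_pvNa]
  have hsplit : ∀ k : Nat,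
      ((pvComb (k + 1) (x :: xs) : List (List (Int × Int))) : Multiset (List (Int × Int))) =
        Multiset.map (fun c => x :: c) ((pvComb k xs : List _) : Multiset _) +
          ((pvComb (k + 1) xs : List _) : Multiset _) := by
    intro k
    have hk : pvComb (k + 1) (x :: xs) = (pvComb k xs).map (fun c => x :: c) ++ pvComb (k + 1) xs := rfl
    rw [hk, ← Multiset.coe_add]
    simp
  show pvCsum (x :: xs) (xs.length + 1) = _
  rw [pvCsum]
  calc ((List.range (xs.length + 1)).map
          (fun k => ((pvComb (k + 1) (x :: xs) : List _) : Multiset (List (Int × Int))))).sum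
      = ((List.range (xs.length + 1)).map
          (fun k => Multiset.map (fun c => x :: c) ((pvComb k xs : List _) : Multiset _) +
            ((pvComb (k + 1) xs : List _) : Multiset _))).sum := by
        exact congrArg List.sum (List.map_congr_left (fun k _ => hsplit k))
    _ = ((List.range (xs.length + 1)).map
          (fun k => Multiset.map (fun c => x :: c) ((pvComb k xs : List _) : Multiset _))).sum +
        ((List.range (xs.length + 1)).map
          (fun k => ((pvComb (k + 1) xs : List _) : Multiset _))).sum := sum_map_add _ _ _
    _ = Multiset.map (fun c => x :: c)
          (((List.range (xs.length + 1)).map (fun k => ((pvComb k xs : List _) : Multiset _))).sum) +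
        pvCsum xs (xs.length + 1) := by rw [msum_map]; rfl
    _ = Multiset.map (fun c => x :: c) (([] : List (Int × Int)) ::ₘ pvCsum xs xs.length) +
        pvCsum xs xs.length := by
        rw [pvCsum_succ, pvComb_eq_nil xs (xs.length + 1) (by omega)]
        congr 2
        · rw [List.range_succ_eq_map]
          simp only [List.map_cons, List.map_map, List.sum_cons]
          have h0 : pvComb 0 xs = [[]] := by cases xs <;> rfl
          rw [h0, show (([[]] : List (List (Int × Int))) : Multiset (List (Int × Int))) = {([] : List (Int × Int))} from rfl, ← Multiset.singleton_add]
          rfl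
        · have hnil : (([] : List (List (Int × Int))) : Multiset (List (Int × Int))) = 0 := rfl
          rw [hnil, add_zero]

theorem pvFoldB (l : List (Int × Int)) (acc : List (Int × Int)) :
    ((l.foldl pvStepL acc : List (Int × Int)) : Multiset (Int × Int)) + {((1 : Int), (0 : Int))} =
      pvH ((acc : Multiset (Int × Int)) + {((1 : Int), (0 : Int))}) l := by
  induction l generalizing acc with
  | nil => rfl
  | cons x xs ih =>
    have hstep : ((pvStepL acc x : List (Int × Int)) : Multiset (Int × Int)) + {((1 : Int), (0 : Int))} =
        pvStep ((acc : Multiset (Int × Int)) + {((1 : Int), (0 : Int))}) x := by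
      have h1 : ((acc.map (fun pq => (pq.1 * x.1, pq.2 + x.2)) : List (Int × Int)) : Multiset (Int × Int)) =
          Multiset.map (pvCx x) (acc : Multiset (Int × Int)) := by
        simp [pvCx]
      have h2 : Multiset.map (pvCx x) ({((1 : Int), (0 : Int))} : Multiset (Int × Int)) =
          {((x.1 : Int), (x.2 : Int))} := by simp [pvCx]
      have hsl : pvStepL acc x = acc.map (fun pq => (pq.1 * x.1, pq.2 + x.2)) ++ [(x.1, x.2)] ++ acc := rfl
      rw [hsl, ← Multiset.coe_add, ← Multiset.coe_add, h1]
      simp only [pvStep, Multiset.map_add, h2]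
      rw [show ((([(x.1, x.2)] : List (Int × Int))) : Multiset (Int × Int)) = {((x.1 : Int), (x.2 : Int))} from rfl]
      abel
    calc ((((x :: xs).foldl pvStepL acc : List _)) : Multiset (Int × Int)) + {((1 : Int), (0 : Int))}
        = ((xs.foldl pvStepL (pvStepL acc x) : List _) : Multiset _) + {((1 : Int), (0 : Int))} := rfl
      _ = pvH (((pvStepL acc x : List _) : Multiset _) + {((1 : Int), (0 : Int))}) xs := ih _
      _ = pvH (pvStep ((acc : Multiset _) + {((1 : Int), (0 : Int))}) x) xs := by rw [hstep]
      _ = pvH ((acc : Multiset _) + {((1 : Int), (0 : Int))}) (x :: xs) := rfl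

theorem pvA_multiset (l : List (Int × Int)) :
    Multiset.map pvPv ((pvNa l : List _) : Multiset _) + {((1 : Int), (0 : Int))} =
      pvH {((1 : Int), (0 : Int))} l := by
  induction l with
  | nil => rfl
  | cons x xs ih =>
    have hmm : ∀ m : Multiset (List (Int × Int)),
        Multiset.map pvPv (Multiset.map (fun c => x :: c) m) =
          Multiset.map (pvCx x) (Multiset.map pvPv m) := by
      intro m
      simp only [Multiset.map_map]
      exact Multiset.map_congr rfl (fun c _ => pvPv_cons x c)
    rw [pvNa_cons, pvH_cons, ← ih, Multiset.map_add, hmm]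
    rw [Multiset.map_cons, show pvPv ([] : List (Int × Int)) = ((1 : Int), (0 : Int)) from rfl]
    rw [← Multiset.singleton_add]
    simp only [Multiset.map_add]
    abel

theorem foldl_flat {α γ : Type} (L : List α) (g : α → List γ) (f : Int → γ → Int) (init : Int) :
    L.foldl (fun b a => (g a).foldl f b) init = (L.flatMap g).foldl f init := by
  induction L generalizing init with
  | nil => rfl
  | cons a L ih => simp [List.flatMap_cons, List.foldl_append, ih]

theorem mem_pvNa_ne_nil (l : List (Int × Int)) (c : List (Int × Int)) (h : c ∈ pvNa l) :
    c ≠ [] := by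
  rw [pvNa, List.mem_flatMap] at h
  obtain ⟨k, hk, hc⟩ := h
  rw [List.mem_map] at hk
  obtain ⟨i, _, rfl⟩ := hk
  exact mem_pvComb_ne_nil l i c hc

theorem subs_multiset (l : List (Int × Int)) :
    ((l.foldl pvStepL [] : List (Int × Int)) : Multiset (Int × Int)) =
      Multiset.map pvPv ((pvNa l : List _) : Multiset _) := by
  have h1 := pvFoldB l []
  have h2 := pvA_multiset l
  rw [show ((([] : List (Int × Int))) : Multiset (Int × Int)) = 0 from rfl, zero_add] at h1
  exact add_right_cancel (h1.trans h2.symm)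

theorem perket_eq_foldl (l : List (Int × Int)) :
    perket l = ((pvNa l).map
        (fun c => |pvReduce1 (· * ·) (c.map Prod.fst) - pvReduce1 (· + ·) (c.map Prod.snd)|)).foldl
      (fun b v => min b v) 1000000000000000000 := by
  rw [perket, PySem.List.pyRange_one]
  rw [show (((l.length : Int) + 1 - 1).toNat) = l.length by omega]
  rw [List.foldl_map]
  have hto : ∀ i : Nat, ((1 : Int) + (i : Int)).toNat = i + 1 := by intro i; omega
  simp only [hto]
  rw [foldl_flat (List.range l.length) (fun i => pvComb (i + 1) l), ← List.foldl_map]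
  rw [pvNa, List.flatMap_map]

theorem perket_alt_eq_foldl (l : List (Int × Int)) :
    perket_alt l = ((l.foldl pvStepL []).map (fun pq => |pq.1 - pq.2|)).foldl
      (fun b v => min b v) 1000000000000000000 := by
  rw [perket_alt, List.foldl_map]
  rfl

-- ===== VERDICT (by name: the statement is the Claim_ definition above) =====
theorem perket_spec : Claim_equal_perket := by
  intro l _
  show perket l = perket_alt l
  rw [perket_eq_foldl, perket_alt_eq_foldl]
  have hmapA : (pvNa l).map
      (fun c => |pvReduce1 (· * ·) (c.map Prod.fst) - pvReduce1 (· + ·) (c.map Prod.snd)|) =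
      (pvNa l).map (fun c => |(pvPv c).1 - (pvPv c).2|) := by
    apply List.map_congr_left
    intro c hc
    obtain ⟨y, ys, rfl⟩ := List.exists_cons_of_ne_nil (mem_pvNa_ne_nil l c hc)
    simp [pvReduce1, pvPv]
  rw [hmapA]
  have hperm : ((pvNa l).map (fun c => |(pvPv c).1 - (pvPv c).2|)).Perm
      ((l.foldl pvStepL []).map (fun pq => |pq.1 - pq.2|)) := by
    rw [← Multiset.coe_eq_coe]
    show ((pvNa l).map (fun c => |(pvPv c).1 - (pvPv c).2|) : Multiset Int) = _
    rw [← Multiset.map_coe, ← Multiset.map_coe, subs_multiset, Multiset.map_map]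
    rfl
  exact hperm.foldl_eq' (fun x _ y _ z => min_right_comm z x y) _
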